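-- pv_equiv track=rewrite | github.com/AndreRivas1103/EjercicioValidadorClavePOO | validadorclave/modelo/validador.py | contiene_calisto
-- ===== SOURCE A (Python) =====
-- def contiene_calisto(clave):
--     clave_lower = clave.lower()
--     if "calisto" not in clave_lower:
--         return False
--
--     # Encuentra todas las ocurrencias de 'calisto' en cualquier casing
--     indices = []
--     start = 0
--     while True:
--         idx = clave_lower.find("calisto", start)
--         if idx == -1:
--             break
--         indices.append(idx)
--         start = idx + 1
--
--     # Verifica cada ocurrencia
--     for idx in indices:
--         substring = clave[idx:idx + 7]  # 'calisto' tiene 7 letras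
--         mayusculas = sum(1 for c in substring if c.isupper())
--         if 2 <= mayusculas < 7:
--             return True
--
--     return False
-- ===== SOURCE B (Python) =====
-- def contiene_calisto(clave):
--     # Character-at-a-time state machine: k = length of the currently matched
--     # prefix of "calisto" (case-insensitive), ups = uppercase letters inside it.
--     # Because all 7 letters of "calisto" are distinct, on a mismatch the only
--     # possible restart is at 'c'; no slicing and no index list is ever built.
--     target = "calisto"
--     k = 0
--     ups = 0
--     for ch in clave:
--         c = ch.lower()
--         if c == target[k]:
--             k += 1
--             ups += 1 if ch.isupper() else 0
--             if k == 7: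
--                 if 2 <= ups < 7:
--                     return True
--                 k = 0
--                 ups = 0
--         elif c == target[0]:
--             k = 1
--             ups = 1 if ch.isupper() else 0
--         else:
--             k = 0
--             ups = 0
--     return False
-- ===== Notes on version B (the rewrite author's own statement) =====
-- stated objective: alternative
-- what changed: A's membership pre-check, find-loop building an index list and separate verification pass over slices are replaced by a single character-at-a-time state machine (matched-prefix length plus running uppercase count, restart only at 'c' since the pattern's letters are all distinct) that never slices the string or builds an index list.
import Mathlib
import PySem

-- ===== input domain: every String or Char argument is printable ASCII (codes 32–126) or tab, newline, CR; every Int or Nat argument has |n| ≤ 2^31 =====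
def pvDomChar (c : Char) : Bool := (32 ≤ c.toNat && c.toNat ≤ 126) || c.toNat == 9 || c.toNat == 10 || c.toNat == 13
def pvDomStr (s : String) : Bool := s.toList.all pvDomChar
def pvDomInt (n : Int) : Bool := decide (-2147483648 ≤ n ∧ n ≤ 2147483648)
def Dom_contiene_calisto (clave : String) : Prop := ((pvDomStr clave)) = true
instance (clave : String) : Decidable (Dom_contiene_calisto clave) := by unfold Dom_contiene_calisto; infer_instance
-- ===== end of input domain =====

-- B replaces A's membership pre-check + find-loop index list + second verification pass by a
-- single character-at-a-time state machine (valid because "calisto" has 7 distinct letters,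
-- so mismatch restarts only at 'c'); objective: simpler/alternative, no slicing or index list.


-- ===== PORT A =====
-- the 'while True: idx = clave_lower.find("calisto", start) …' loop; fuel (length+1) only
-- makes the recursion total, start strictly increases each round so it is never exhausted
def pvCollect (s : List Char) : Nat → Nat → List Int
  | 0, _ => []
  | fuel + 1, start =>
    let idx := PySem.Chars.findFrom s "calisto".toList (start : Int) none
    if idx = -1 then [] else idx :: pvCollect s fuel (idx.toNat + 1)

-- the 'for idx in indices: …' verification loop with its early return
def pvCheck (s : List Char) : List Int → Bool
  | [] => false
  | idx :: rest =>
    let substring := PySem.List.slice s (some idx) (some (idx + 7))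
    let mayusculas := substring.foldl (fun acc c => if PySem.Chars.isupper c then acc + 1 else acc) (0 : Int)
    if 2 ≤ mayusculas ∧ mayusculas < 7 then true else pvCheck s rest

def contiene_calisto (clave : String) : Bool :=
  let s := clave.toList
  let clave_lower := PySem.Chars.lower s
  if PySem.Chars.isIn "calisto".toList clave_lower = false then false
  else pvCheck s (pvCollect clave_lower (clave_lower.length + 1) 0)

-- ===== PORT B =====
-- the pattern 'target' of Source B
def pvPat : List Char := "calisto".toList

-- Source B's for-loop: state (k, ups) = matched-prefix length and uppercase count inside it;
-- the early 'return True' is the 'true' branch, falling out of the loop is the '[]' case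
def pvAuto : List Char → Nat → Nat → Bool
  | [], _, _ => false
  | ch :: rest, k, ups =>
    let c := PySem.Chars.lowerChar ch
    if c = pvPat.getD k ' ' then
      let k' := k + 1
      let ups' := ups + (if PySem.Chars.isupper ch then 1 else 0)
      if k' = 7 then
        if 2 ≤ ups' ∧ ups' < 7 then true else pvAuto rest 0 0
      else pvAuto rest k' ups'
    else if c = 'c' then pvAuto rest 1 (if PySem.Chars.isupper ch then 1 else 0)
    else pvAuto rest 0 0

def contiene_calisto_alt (clave : String) : Bool := pvAuto clave.toList 0 0

-- ===== PRECONDITION & SPEC =====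
def Spec_contiene_calisto (clave : String) (out : Bool) : Prop := out = contiene_calisto_alt clave
instance (clave : String) (out : Bool) : Decidable (Spec_contiene_calisto clave out) := by unfold Spec_contiene_calisto; infer_instance

-- ===== CLAIM (what is proved, stated in full; the proofs are below) =====
def Claim_equal_contiene_calisto : Prop := ∀ (clave : String), Dom_contiene_calisto clave → Spec_contiene_calisto clave (contiene_calisto clave)

-- ===== LEMMAS AND PROOFS =====

-- the common characterisation both ports are reduced to:
-- "some case-insensitive occurrence of 'calisto' whose original-case window has 2..6 uppers"
def pvGood (s : List Char) (j : Nat) : Prop :=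
  2 ≤ ((s.drop j).take 7).countP (fun c => PySem.Chars.isupper c) ∧
  ((s.drop j).take 7).countP (fun c => PySem.Chars.isupper c) < 7

---------------------------------------------------------------- A side ----------

theorem pv_prefix_infix_drop (s : List Char) (start j : Nat) (hj : start ≤ j)
    (hp : "calisto".toList <+: s.drop j) : "calisto".toList <:+: s.drop start := by
  have h1 : s.drop j = (s.drop start).drop (j - start) := by
    rw [List.drop_drop]; congr 1; omega
  rw [h1] at hp
  exact hp.isInfix.trans (List.drop_suffix _ _).isInfix

theorem pv_prefix_len (s : List Char) (j : Nat)
    (hp : "calisto".toList <+: s.drop j) : j + 7 ≤ s.length := by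
  have := hp.length_le
  simp only [List.length_drop] at this
  have h7 : ("calisto".toList).length = 7 := by decide
  omega

theorem pv_collect_mem (s : List Char) :
    ∀ (fuel start : Nat), start ≤ s.length → s.length + 1 - start ≤ fuel →
      ∀ i : Int, i ∈ pvCollect s fuel start ↔
        ∃ j : Nat, i = (j : Int) ∧ start ≤ j ∧ "calisto".toList <+: s.drop j := by
  intro fuel
  induction fuel with
  | zero => intro start hs hf; omega
  | succ fuel ih =>
    intro start hs hf i
    simp only [pvCollect]
    by_cases hidx : PySem.Chars.findFrom s "calisto".toList (start : Int) none = -1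
    · rw [if_pos hidx]
      simp only [List.not_mem_nil, false_iff, not_exists]
      intro j ⟨_, hj, hp⟩
      exact ((PySem.Chars.findFrom_natCast_eq_neg_one_iff s _ start hs).mp hidx)
        (pv_prefix_infix_drop s start j hj hp)
    · rw [if_neg hidx]
      obtain ⟨hlb, hpre, hmin⟩ := PySem.Chars.findFrom_natCast_spec s _ start hs hidx
      set idx := PySem.Chars.findFrom s "calisto".toList (start : Int) none with hdef
      have h0 : 0 ≤ idx := le_trans (by exact_mod_cast Nat.zero_le start) hlb
      have hsn : start ≤ idx.toNat := by omega
      have hlen : idx.toNat + 7 ≤ s.length := pv_prefix_len s idx.toNat hpre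
      rw [List.mem_cons, ih (idx.toNat + 1) (by omega) (by omega) i]
      constructor
      · rintro (rfl | ⟨j, rfl, hj, hp⟩)
        · exact ⟨idx.toNat, by omega, hsn, hpre⟩
        · exact ⟨j, rfl, by omega, hp⟩
      · rintro ⟨j, rfl, hj, hp⟩
        by_cases hje : j = idx.toNat
        · left; omega
        · right
          refine ⟨j, rfl, ?_, hp⟩
          by_contra hlt
          exact hmin j hj (by omega) hp

theorem pv_check_iff (s : List Char) (l : List Int)
    (h : ∀ i ∈ l, ∃ j : Nat, i = (j : Int)) :
    pvCheck s l = true ↔ ∃ j : Nat, (j : Int) ∈ l ∧ pvGood s j := by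
  induction l with
  | nil => simp [pvCheck]
  | cons idx rest ih =>
    obtain ⟨j0, rfl⟩ := h idx (List.mem_cons_self ..)
    have ih' := ih (fun i hi => h i (List.mem_cons_of_mem _ hi))
    simp only [pvCheck]
    have hsl : PySem.List.slice s (some (j0 : Int)) (some ((j0 : Int) + 7)) =
        (s.drop j0).take 7 := by
      have := PySem.List.slice_natCast_add s j0 7
      push_cast at this ⊢
      exact this
    rw [hsl, PySem.List.foldl_if_add_one]
    have hcnt :
        ((0 : Int) + ((((s.drop j0).take 7).countP (fun c => PySem.Chars.isupper c) : Nat) : Int)) =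
        (((s.drop j0).take 7).countP (fun c => PySem.Chars.isupper c) : Int) := by ring
    rw [hcnt]
    by_cases hG : pvGood s j0
    · rw [if_pos]
      · simp only [true_iff]
        exact ⟨j0, List.mem_cons_self .., hG⟩
      · unfold pvGood at hG; omega
    · rw [if_neg]
      · rw [ih']
        constructor
        · rintro ⟨j, hj, hg⟩; exact ⟨j, List.mem_cons_of_mem _ hj, hg⟩
        · rintro ⟨j, hj, hg⟩
          rcases List.mem_cons.mp hj with heq | hm
          · exfalso; apply hG
            have : j = j0 := by exact_mod_cast heq
            rwa [this] at hg
          · exact ⟨j, hm, hg⟩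
      · unfold pvGood at hG; omega

theorem pv_A_iff (clave : String) :
    contiene_calisto clave = true ↔
      ∃ j : Nat, "calisto".toList <+: (PySem.Chars.lower clave.toList).drop j ∧ pvGood clave.toList j := by
  simp only [contiene_calisto]
  by_cases hin : PySem.Chars.isIn "calisto".toList (PySem.Chars.lower clave.toList) = false
  · rw [if_pos hin]
    simp only [Bool.false_eq_true, false_iff, not_exists]
    rintro j ⟨hp, _⟩
    have : PySem.Chars.isIn "calisto".toList (PySem.Chars.lower clave.toList) = true :=
      (PySem.Chars.exists_prefix_drop_iff_isIn _ _).mp ⟨j, hp⟩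
    rw [show "calisto".toList = ['c','a','l','i','s','t','o'] from by decide] at this hin
    rw [this] at hin
    simp at hin
  · rw [if_neg hin]
    have hmem := pv_collect_mem (PySem.Chars.lower clave.toList)
      ((PySem.Chars.lower clave.toList).length + 1) 0 (Nat.zero_le _) (by omega)
    rw [pv_check_iff clave.toList _ (fun i hi => by
      obtain ⟨j, hj, _⟩ := (hmem i).mp hi; exact ⟨j, hj⟩)]
    constructor
    · rintro ⟨j, hj, hg⟩
      obtain ⟨j', he, _, hp⟩ := (hmem _).mp hj
      have : j' = j := by exact_mod_cast he.symm
      exact ⟨j, by rwa [this] at hp, hg⟩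
    · rintro ⟨j, hp, hg⟩
      exact ⟨j, (hmem _).mpr ⟨j, rfl, Nat.zero_le _, hp⟩, hg⟩

---------------------------------------------------------------- B side ----------

-- all seven letters of the pattern are pairwise distinct
theorem pv_inj : ∀ i j : Nat, i ≤ 6 → j ≤ 6 →
    pvPat.getD i ' ' = pvPat.getD j ' ' → i = j := by
  intro i j hi hj h
  interval_cases i <;> interval_cases j <;> first | rfl | (exfalso; revert h; decide)

-- a nonempty prefix of the pattern occurring as a suffix of a longer prefix must be that prefix
theorem pv_overlap : ∀ k m : Nat, m ≤ k → k ≤ 6 → 1 ≤ m →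
    (pvPat.take k).drop (k - m) = pvPat.take m → m = k := by
  intro k m hm hk h1 h
  interval_cases k <;> interval_cases m <;> first | rfl | (exfalso; revert h; decide)

-- peeling the last character off a length-l pattern-suffix condition
theorem pv_snoc (low : List Char) (c : Char) (l : Nat) (h1 : 1 ≤ l) (h7 : l ≤ 7) :
    ((low ++ [c]).drop (low.length + 1 - l) = pvPat.take l) ↔
    (low.drop (low.length - (l - 1)) = pvPat.take (l - 1) ∧ c = pvPat.getD (l - 1) ' ') := by
  have hm : low.length + 1 - l = low.length - (l - 1) := by omega
  have hpat : pvPat.take l = pvPat.take (l - 1) ++ [pvPat.getD (l - 1) ' '] := by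
    interval_cases l <;> decide
  have hd : (low ++ [c]).drop (low.length - (l - 1)) =
      low.drop (low.length - (l - 1)) ++ [c] := by
    rw [List.drop_append]
    have h0 : low.length - (l - 1) - low.length = 0 := by omega
    rw [h0, List.drop_zero]
  rw [hm, hd, hpat]
  constructor
  · intro h
    have := List.append_inj' h rfl
    exact ⟨this.1, by simpa using this.2⟩
  · rintro ⟨ha, hb⟩; rw [ha, hb]

-- an occurrence whose window lies inside a prefix of s only depends on that prefix
theorem pv_occ (pre rest : List Char) (j : Nat) (hj : j + 7 ≤ pre.length) :
    (pvPat <+: ((pre ++ rest).map PySem.Chars.lowerChar).drop j ↔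
     pvPat <+: (pre.map PySem.Chars.lowerChar).drop j) := by
  have h7 : pvPat.length = 7 := by decide
  rw [List.map_append, List.drop_append,
    show j - (pre.map PySem.Chars.lowerChar).length = 0 by simp; omega,
    List.drop_zero, List.prefix_iff_eq_take, List.prefix_iff_eq_take, h7,
    List.take_append_of_le_length (by simp [List.length_drop]; omega)]

-- an occurrence ending exactly at the end of pre, as a suffix equation
theorem pv_occ_exact (pre : List Char) (j : Nat) (hj : j + 7 = pre.length) :
    (pvPat <+: (pre.map PySem.Chars.lowerChar).drop j ↔
     (pre.map PySem.Chars.lowerChar).drop j = pvPat.take 7) := by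
  have h7 : pvPat.length = 7 := by decide
  have ht : pvPat.take 7 = pvPat := by decide
  rw [List.prefix_iff_eq_take, h7, ht,
    List.take_of_length_le (by simp [List.length_drop]; omega)]
  exact ⟨Eq.symm, Eq.symm⟩

-- characterise a NEW occurrence, the one ending at position done.length + 1
theorem pv_new_occ (done rest : List Char) (ch : Char) (j : Nat)
    (hj : j + 7 = done.length + 1) :
    (pvPat <+: (((done ++ [ch]) ++ rest).map PySem.Chars.lowerChar).drop j) ↔
    ((done.map PySem.Chars.lowerChar).drop (done.length - 6) = pvPat.take 6 ∧
      PySem.Chars.lowerChar ch = pvPat.getD 6 ' ') := by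
  have hlen : (done ++ [ch]).length = done.length + 1 := by simp
  rw [pv_occ _ rest j (by omega)]
  rw [pv_occ_exact _ j (by omega)]
  have hmap : (done ++ [ch]).map PySem.Chars.lowerChar =
      done.map PySem.Chars.lowerChar ++ [PySem.Chars.lowerChar ch] := by simp
  have hj' : j = (done.map PySem.Chars.lowerChar).length + 1 - 7 := by simp; omega
  rw [hmap, hj']
  have := pv_snoc (done.map PySem.Chars.lowerChar) (PySem.Chars.lowerChar ch) 7
    (by omega) (le_refl 7)
  simpa [List.length_map] using this

-- uppercase count in the window of the new occurrence
theorem pv_ups (done rest : List Char) (ch : Char) (j : Nat)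
    (hj : j + 7 = done.length + 1) :
    (((((done ++ [ch]) ++ rest).drop j).take 7).countP (fun c => PySem.Chars.isupper c)) =
    ((done.drop (done.length - 6)).countP (fun c => PySem.Chars.isupper c)) +
      (if PySem.Chars.isupper ch then 1 else 0) := by
  have hlen : (done ++ [ch]).length = done.length + 1 := by simp
  rw [List.drop_append, show j - (done ++ [ch]).length = 0 by omega, List.drop_zero,
    List.take_append_of_le_length (by simp [List.length_drop]; omega),
    List.take_of_length_le (by simp [List.length_drop]; omega),
    List.drop_append, show j - done.length = 0 by omega, List.drop_zero,
    show j = done.length - 6 by omega,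
    List.countP_append, List.countP_singleton]

-- the state-machine invariant: k is the longest pattern prefix matching a suffix of the
-- processed text, ups counts its uppercase letters, and every fully-processed window failed
theorem pvAuto_iff (s : List Char) :
    ∀ (rest done : List Char) (k ups : Nat),
    s = done ++ rest → k ≤ 6 → k ≤ done.length →
    (done.map PySem.Chars.lowerChar).drop (done.length - k) = pvPat.take k →
    (∀ l, k < l → l ≤ 6 → l ≤ done.length →
        (done.map PySem.Chars.lowerChar).drop (done.length - l) ≠ pvPat.take l) →
    ups = (done.drop (done.length - k)).countP (fun c => PySem.Chars.isupper c) →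
    (∀ j, j + 7 ≤ done.length →
        pvPat <+: (s.map PySem.Chars.lowerChar).drop j → ¬ pvGood s j) →
    (pvAuto rest k ups = true ↔
      ∃ j : Nat, pvPat <+: (s.map PySem.Chars.lowerChar).drop j ∧ pvGood s j) := by
  intro rest
  induction rest with
  | nil =>
    intro done k ups hs hk hkd hmatch hmax hups hdone
    have hsd : done = s := by simpa using hs.symm
    subst hsd
    simp only [pvAuto, Bool.false_eq_true, false_iff, not_exists]
    rintro j ⟨hp, hg⟩
    have hlen : j + 7 ≤ done.length := by
      have := pv_prefix_len (done.map PySem.Chars.lowerChar) j (by simpa [pvPat] using hp)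
      simpa using this
    exact hdone j hlen hp hg
  | cons ch rest ih =>
    intro done k ups hs hk hkd hmatch hmax hups hdone
    have hs' : s = (done ++ [ch]) ++ rest := by rw [hs]; simp
    have hlen' : (done ++ [ch]).length = done.length + 1 := by simp
    have hmap' : (done ++ [ch]).map PySem.Chars.lowerChar =
        done.map PySem.Chars.lowerChar ++ [PySem.Chars.lowerChar ch] := by simp
    -- generic decomposition of a suffix-equation on done ++ [ch]
    have hdec : ∀ l, 1 ≤ l → l ≤ 7 →
        (((done ++ [ch]).map PySem.Chars.lowerChar).drop ((done ++ [ch]).length - l)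
          = pvPat.take l ↔
        ((done.map PySem.Chars.lowerChar).drop (done.length - (l - 1)) = pvPat.take (l - 1) ∧
          PySem.Chars.lowerChar ch = pvPat.getD (l - 1) ' ')) := by
      intro l h1 h7
      rw [hmap', hlen',
        show done.length + 1 - l = (done.map PySem.Chars.lowerChar).length + 1 - l by simp]
      have := pv_snoc (done.map PySem.Chars.lowerChar) (PySem.Chars.lowerChar ch) l h1 h7
      simpa [List.length_map] using this
    simp only [pvAuto]
    by_cases hc1 : PySem.Chars.lowerChar ch = pvPat.getD k ' '
    · rw [if_pos hc1]
      by_cases hk7 : k + 1 = 7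
      · rw [if_pos hk7]
        have hk6 : k = 6 := by omega
        subst hk6
        have hn6 : 6 ≤ done.length := hkd
        -- the new window ending at done.length + 1 exists; its count is ups + bit
        have hocc : pvPat <+: (s.map PySem.Chars.lowerChar).drop (done.length - 6) := by
          rw [hs', pv_new_occ done rest ch (done.length - 6) (by omega)]
          exact ⟨hmatch, hc1⟩
        have hcnt : (((s.drop (done.length - 6)).take 7).countP
            (fun c => PySem.Chars.isupper c))
            = ups + (if PySem.Chars.isupper ch then 1 else 0) := by
          rw [hs', pv_ups done rest ch (done.length - 6) (by omega), ← hups]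
        by_cases hgood : 2 ≤ ups + (if PySem.Chars.isupper ch then 1 else 0) ∧
            ups + (if PySem.Chars.isupper ch then 1 else 0) < 7
        · rw [if_pos hgood]
          simp only [true_iff]
          refine ⟨done.length - 6, hocc, ?_⟩
          unfold pvGood
          rw [hcnt]
          exact hgood
        · rw [if_neg hgood]
          have hmax0 : ∀ l, 0 < l → l ≤ 6 → l ≤ (done ++ [ch]).length →
              ((done ++ [ch]).map PySem.Chars.lowerChar).drop
                ((done ++ [ch]).length - l) ≠ pvPat.take l := by
            intro l hl0 hl6 hln heq
            rw [hdec l (by omega) (by omega)] at heq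
            have := pv_inj (l - 1) 6 (by omega) (by omega) (heq.2.symm.trans hc1)
            omega
          have hdone' : ∀ j, j + 7 ≤ (done ++ [ch]).length →
              pvPat <+: (s.map PySem.Chars.lowerChar).drop j → ¬ pvGood s j := by
            intro j hj hp hg
            rw [hlen'] at hj
            rcases Nat.lt_or_ge (j + 7) (done.length + 1) with hlt | hge
            · exact hdone j (by omega) hp hg
            · have hj6 : j = done.length - 6 := by omega
              subst hj6
              unfold pvGood at hg
              rw [hcnt] at hg
              exact hgood hg
          rw [ih (done ++ [ch]) 0 0 hs' (by omega) (by omega) (by simp) hmax0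
            (by simp) hdone']
      · rw [if_neg hk7]
        refine ih (done ++ [ch]) (k + 1)
          (ups + (if PySem.Chars.isupper ch then 1 else 0)) hs' (by omega)
          (by simp; omega) ?_ ?_ ?_ ?_
        · rw [hdec (k + 1) (by omega) (by omega)]
          simpa using ⟨hmatch, hc1⟩
        · intro l hl hl6 hln heq
          rw [hdec l (by omega) (by omega)] at heq
          exact hmax (l - 1) (by omega) (by omega) (by simp at hln; omega) heq.1
        · rw [hlen', show done.length + 1 - (k + 1) = done.length - k by omega,
            List.drop_append, show done.length - k - done.length = 0 by omega,
            List.drop_zero, List.countP_append, List.countP_singleton, hups]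
        · intro j hj hp
          rw [hlen'] at hj
          rcases Nat.lt_or_ge (j + 7) (done.length + 1) with hlt | hge
          · exact hdone j (by omega) hp
          · exfalso
            rw [hs', pv_new_occ done rest ch j (by omega)] at hp
            exact hmax 6 (by omega) (by omega) (by omega) hp.1
    · rw [if_neg hc1]
      by_cases hc2 : PySem.Chars.lowerChar ch = 'c'
      · rw [if_pos hc2]
        refine ih (done ++ [ch]) 1 (if PySem.Chars.isupper ch then 1 else 0) hs'
          (by omega) (by simp) ?_ ?_ ?_ ?_
        · rw [hdec 1 (by omega) (by omega)]
          refine ⟨?_, by rw [hc2]; decide⟩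
          rw [Nat.sub_zero,
            show done.length = (done.map PySem.Chars.lowerChar).length by simp]
          simp
        · intro l hl hl6 hln heq
          rw [hdec l (by omega) (by omega)] at heq
          have h0 : PySem.Chars.lowerChar ch = pvPat.getD 0 ' ' := by rw [hc2]; decide
          have := pv_inj (l - 1) 0 (by omega) (by omega) (heq.2.symm.trans h0)
          omega
        · rw [hlen', Nat.add_sub_cancel, List.drop_append, Nat.sub_self,
            List.drop_zero, List.countP_append, List.countP_singleton,
            List.drop_length, List.countP_nil, Nat.zero_add]
        · intro j hj hp
          rw [hlen'] at hj
          rcases Nat.lt_or_ge (j + 7) (done.length + 1) with hlt | hge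
          · exact hdone j (by omega) hp
          · exfalso
            rw [hs', pv_new_occ done rest ch j (by omega)] at hp
            have h6 : PySem.Chars.lowerChar ch = pvPat.getD 6 ' ' := hp.2
            have h0 : PySem.Chars.lowerChar ch = pvPat.getD 0 ' ' := by rw [hc2]; decide
            have := pv_inj 6 0 (by omega) (by omega) (h6.symm.trans h0)
            omega
      · rw [if_neg hc2]
        refine ih (done ++ [ch]) 0 0 hs' (by omega) (by omega) (by simp) ?_ (by simp) ?_
        · intro l hl0 hl6 hln heq
          rw [hdec l (by omega) (by omega)] at heq
          obtain ⟨hpre, hcl⟩ := heq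
          rcases Nat.eq_or_lt_of_le (show 1 ≤ l from hl0) with h1 | h2
          · apply hc2
            rw [hcl, ← h1]; decide
          · rcases Nat.lt_or_ge k (l - 1) with hgt | hle
            · exact hmax (l - 1) hgt (by omega) (by simp at hln; omega) hpre
            · have hsub : (done.map PySem.Chars.lowerChar).drop (done.length - (l - 1)) =
                  (pvPat.take k).drop (k - (l - 1)) := by
                rw [← hmatch, List.drop_drop]
                congr 1
                omega
              have heqk : l - 1 = k :=
                pv_overlap k (l - 1) hle hk (by omega) (by rw [← hsub, hpre])
              exact hc1 (hcl.trans (by rw [heqk]))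
        · intro j hj hp
          rw [hlen'] at hj
          rcases Nat.lt_or_ge (j + 7) (done.length + 1) with hlt | hge
          · exact hdone j (by omega) hp
          · exfalso
            rw [hs', pv_new_occ done rest ch j (by omega)] at hp
            obtain ⟨hpre, hcl⟩ := hp
            rcases Nat.lt_or_ge k 6 with hlt6 | hge6
            · exact hmax 6 hlt6 (by omega) (by omega) hpre
            · have hk6 : k = 6 := by omega
              exact hc1 (hcl.trans (by rw [hk6]))

theorem pv_B_iff (clave : String) :
    contiene_calisto_alt clave = true ↔
      ∃ j : Nat, "calisto".toList <+: (PySem.Chars.lower clave.toList).drop j ∧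
        pvGood clave.toList j := by
  have h := pvAuto_iff clave.toList clave.toList [] 0 0 (by simp) (by omega) (by simp)
    (by simp) (by intro l hl0 _ hln; simp at hln; omega) (by simp)
    (by intro j hj _; simp at hj)
  exact h

-- ===== VERDICT (by name: the statement is the Claim_ definition above) =====
theorem contiene_calisto_spec : Claim_equal_contiene_calisto := by
  intro clave _
  unfold Spec_contiene_calisto
  have h := (pv_A_iff clave).trans (pv_B_iff clave).symm
  cases hA : contiene_calisto clave <;> cases hB : contiene_calisto_alt clave <;>
    simp [hA, hB] at h ⊢
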